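-- pv_equiv track=rewrite | github.com/HCI-UnrSeniorCapstone/2024-2025_Senior_Project | local_backend/app.py | set_available_features
-- ===== SOURCE A (Python) =====
-- def set_available_features(task_measurments):
--     meaurement_id = []
--     # makes sures the default taks are false
--     default_tasks = {
--         "Mouse Movement": False,
--         "Mouse Scrolls": False,
--         "Mouse Clicks": False,
--         "Keyboard Inputs": False,
--     }
--
--     default_measurment_ids = {
--         "Mouse Movement": 1,
--         "Mouse Scrolls": 2,
--         "Mouse Clicks": 3,
--         "Keyboard Inputs": 4,
--     }
--
--     # checks if features are in the array, then it will change hash into true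
--     for task in task_measurments:
--         if task in default_tasks:
--             default_tasks[task] = True
--             meaurement_id.append(default_measurment_ids[task])
--
--     return default_tasks, meaurement_id
-- ===== SOURCE B (Python) =====
-- def set_available_features(task_measurments):
--     default_tasks = ["Mouse Movement", "Mouse Scrolls", "Mouse Clicks", "Keyboard Inputs"]
--     default_measurment_ids = {
--         "Mouse Movement": 1,
--         "Mouse Scrolls": 2,
--         "Mouse Clicks": 3,
--         "Keyboard Inputs": 4,
--     }
--     flags = {name: name in task_measurments for name in default_tasks}
--     ids = [default_measurment_ids[t] for t in task_measurments if t in default_measurment_ids]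
--     return flags, ids
-- ===== Notes on version B (the rewrite author's own statement) =====
-- stated objective: simpler
-- what changed: Replaces the fused mutate-a-dict loop by two independent passes: a dict comprehension over the four fixed feature names (flag = membership of the name in the input) and a list comprehension over the input for the ids.
import Mathlib
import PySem

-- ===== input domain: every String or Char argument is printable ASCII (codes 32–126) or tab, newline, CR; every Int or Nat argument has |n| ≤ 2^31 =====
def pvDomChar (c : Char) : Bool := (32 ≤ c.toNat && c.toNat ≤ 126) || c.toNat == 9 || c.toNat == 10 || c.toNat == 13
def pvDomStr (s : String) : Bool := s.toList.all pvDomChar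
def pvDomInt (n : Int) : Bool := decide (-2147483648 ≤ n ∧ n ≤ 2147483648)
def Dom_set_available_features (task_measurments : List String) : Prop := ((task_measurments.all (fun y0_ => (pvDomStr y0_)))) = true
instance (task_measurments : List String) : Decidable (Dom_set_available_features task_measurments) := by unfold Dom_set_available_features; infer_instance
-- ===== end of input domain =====

-- B computes the same pair in two independent passes (flags over the four fixed names, ids over the input) instead of A's single dict-mutating loop; objective: simpler.

-- ===== PORT A =====
-- A's literal dict constants
def pvDefaultTasksA : PySem.Dict String Bool :=
  PySem.Dict.mk [("Mouse Movement", false), ("Mouse Scrolls", false),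
                 ("Mouse Clicks", false), ("Keyboard Inputs", false)]

def pvIdsA : PySem.Dict String Int :=
  PySem.Dict.mk [("Mouse Movement", 1), ("Mouse Scrolls", 2),
                 ("Mouse Clicks", 3), ("Keyboard Inputs", 4)]

-- the loop body: if task in default_tasks: default_tasks[task] = True; meaurement_id.append(default_measurment_ids[task])
-- (default_measurment_ids[task] is exact as get?.getD 0: the guard guarantees the key, the two dicts have the same keys)
def pvStepA (st : PySem.Dict String Bool × List Int) (task : String) :
    PySem.Dict String Bool × List Int :=
  if st.1.contains task then
    (st.1.insert task true, st.2 ++ [(pvIdsA.get? task).getD 0])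
  else st

def set_available_features (task_measurments : List String) : (List (String × Bool)) × List Int :=
  let st := task_measurments.foldl pvStepA (pvDefaultTasksA, [])
  (st.1.items, st.2)

-- ===== PORT B =====
def pvIdsB : PySem.Dict String Int :=
  PySem.Dict.mk [("Mouse Movement", 1), ("Mouse Scrolls", 2),
                 ("Mouse Clicks", 3), ("Keyboard Inputs", 4)]

def set_available_features_alt (task_measurments : List String) : (List (String × Bool)) × List Int :=
  let default_tasks := ["Mouse Movement", "Mouse Scrolls", "Mouse Clicks", "Keyboard Inputs"]
  let flags := default_tasks.map (fun name => (name, task_measurments.contains name))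
  let ids := (task_measurments.filter (fun t => pvIdsB.contains t)).map
               (fun t => (pvIdsB.get? t).getD 0)
  (flags, ids)

-- ===== PRECONDITION & SPEC =====
def Spec_set_available_features (task_measurments : List String) (out : (List (String × Bool)) × List Int) : Prop := out = set_available_features_alt task_measurments
instance (task_measurments : List String) (out : (List (String × Bool)) × List Int) : Decidable (Spec_set_available_features task_measurments out) := by unfold Spec_set_available_features; infer_instance

-- ===== CLAIM (what is proved, stated in full; the proofs are below) =====
def Claim_equal_set_available_features : Prop := ∀ (task_measurments : List String), Dom_set_available_features task_measurments → Spec_set_available_features task_measurments (set_available_features task_measurments)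

-- ===== LEMMAS AND PROOFS =====

-- invariant of A's loop: the dict always keeps its four fixed entries (flag ORed with
-- membership in the remaining input) and the id list grows by the filtered/mapped input
lemma pvLoopA (ts : List String) (b1 b2 b3 b4 : Bool) (acc : List Int) :
    ts.foldl pvStepA
      (PySem.Dict.mk [("Mouse Movement", b1), ("Mouse Scrolls", b2),
                      ("Mouse Clicks", b3), ("Keyboard Inputs", b4)], acc)
    = (PySem.Dict.mk [("Mouse Movement", b1 || ts.contains "Mouse Movement"),
                      ("Mouse Scrolls", b2 || ts.contains "Mouse Scrolls"),
                      ("Mouse Clicks", b3 || ts.contains "Mouse Clicks"),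
                      ("Keyboard Inputs", b4 || ts.contains "Keyboard Inputs")],
       acc ++ (ts.filter (fun t => pvIdsA.contains t)).map (fun t => (pvIdsA.get? t).getD 0)) := by
  induction ts generalizing b1 b2 b3 b4 acc with
  | nil => simp
  | cons t rest ih =>
    by_cases h1 : t = "Mouse Movement"
    · subst h1
      simp [pvStepA, PySem.Dict.contains, PySem.Dict.insert, pvIdsA, List.foldl_cons, ih]
    · by_cases h2 : t = "Mouse Scrolls"
      · subst h2
        simp [pvStepA, PySem.Dict.contains, PySem.Dict.insert, pvIdsA, List.foldl_cons, ih]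
      · by_cases h3 : t = "Mouse Clicks"
        · subst h3
          simp [pvStepA, PySem.Dict.contains, PySem.Dict.insert, pvIdsA, List.foldl_cons, ih]
        · by_cases h4 : t = "Keyboard Inputs"
          · subst h4
            simp [pvStepA, PySem.Dict.contains, PySem.Dict.insert, pvIdsA, List.foldl_cons, ih]
          · simp [pvStepA, PySem.Dict.contains, pvIdsA, List.foldl_cons, ih,
                  Ne.symm h1, Ne.symm h2, Ne.symm h3, Ne.symm h4]

-- ===== VERDICT (by name: the statement is the Claim_ definition above) =====
theorem set_available_features_spec : Claim_equal_set_available_features := by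
  intro ts _
  unfold Spec_set_available_features set_available_features set_available_features_alt
  simp only [pvDefaultTasksA]
  rw [pvLoopA]
  simp [pvIdsA, pvIdsB]
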